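-- pv_equiv track=rewrite | github.com/Fiberlux-Tech/FLXContabilidadEEFF | backend/services/headcount_service.py | _detect_roster_columns
-- ===== SOURCE A (Python) =====
-- _HEADER_ALIASES: dict[str, list[str]] = {
--     "ano_mes": ["AÑO-MES", "ANO-MES", "AÑO_MES", "ANO_MES", "YEAR_MONTH", "MES"],
--     "empresa": ["EMPRESA", "CIA", "COMPANY"],
--     "empleado": ["EMPLEADO", "EMPLOYEE", "EMPLEADO_ID", "ID_EMPLEADO"],
--     "nombre": ["NOMBRE", "NAME", "NOMBRE_EMPLEADO"],
--     "ceco_code": [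
--         "COD_CENTRO_DE_COSTO", "COD_CENTRO_COSTO", "CECO_CODE",
--     ],
-- }
--
-- def _detect_roster_columns(header: list[str]) -> dict[str, int]:
--     """Map canonical column names to their index in the CSV header.
--
--     Raises ValueError if any required column is not found.
--     """
--     normalised = [
--         h.strip().upper().replace(" ", "_").replace("-", "_")
--         for h in header
--     ]
--     result: dict[str, int] = {}
--     for key, aliases in _HEADER_ALIASES.items():
--         for i, col in enumerate(normalised):
--             if col in [a.replace("-", "_") for a in aliases]:
--                 result[key] = i
--                 break
--     # Fallback: assume standard column order if header detection fails
--     missing = [k for k in _HEADER_ALIASES if k not in result]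
--     if missing:
--         # Try positional fallback: A=año-mes, B=empresa, C=empleado, D=nombre, F=cod ceco
--         if len(header) >= 6:
--             result.setdefault("ano_mes", 0)
--             result.setdefault("empresa", 1)
--             result.setdefault("empleado", 2)
--             result.setdefault("nombre", 3)
--             result.setdefault("ceco_code", 5)
--         else:
--             raise ValueError(
--                 f"Could not detect required columns: {missing}. "
--                 f"Expected headers: Año-Mes, EMPRESA, EMPLEADO, COD CENTRO DE COSTO"
--             )
--     return result
-- ===== SOURCE B (Python) =====
-- _HEADER_ALIASES: dict[str, list[str]] = {
--     "ano_mes": ["AÑO-MES", "ANO-MES", "AÑO_MES", "ANO_MES", "YEAR_MONTH", "MES"],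
--     "empresa": ["EMPRESA", "CIA", "COMPANY"],
--     "empleado": ["EMPLEADO", "EMPLOYEE", "EMPLEADO_ID", "ID_EMPLEADO"],
--     "nombre": ["NOMBRE", "NAME", "NOMBRE_EMPLEADO"],
--     "ceco_code": [
--         "COD_CENTRO_DE_COSTO", "COD_CENTRO_COSTO", "CECO_CODE",
--     ],
-- }
--
-- _ALIAS_TO_KEY: dict[str, str] = {
--     a.replace("-", "_"): key
--     for key, aliases in _HEADER_ALIASES.items()
--     for a in aliases
-- }
--
--
-- def _detect_roster_columns(header: list[str]) -> dict[str, int]: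
--     """Map canonical column names to their index in the CSV header.
--
--     Raises ValueError if any required column is not found.
--     """
--     normalised = [
--         h.strip().upper().replace(" ", "_").replace("-", "_")
--         for h in header
--     ]
--     # single pass over the columns: remember the first column per canonical key
--     found: dict[str, int] = {}
--     for i, col in enumerate(normalised):
--         key = _ALIAS_TO_KEY.get(col)
--         if key is not None:
--             found.setdefault(key, i)
--     result = {k: found[k] for k in _HEADER_ALIASES if k in found}
--     missing = [k for k in _HEADER_ALIASES if k not in result]
--     if missing:
--         # Try positional fallback: A=año-mes, B=empresa, C=empleado, D=nombre, F=cod ceco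
--         if len(header) >= 6:
--             result.setdefault("ano_mes", 0)
--             result.setdefault("empresa", 1)
--             result.setdefault("empleado", 2)
--             result.setdefault("nombre", 3)
--             result.setdefault("ceco_code", 5)
--         else:
--             raise ValueError(
--                 f"Could not detect required columns: {missing}. "
--                 f"Expected headers: Año-Mes, EMPRESA, EMPLEADO, COD CENTRO DE COSTO"
--             )
--     return result
-- ===== Notes on version B (the rewrite author's own statement) =====
-- stated objective: faster
-- what changed: Replaces A's per-key rescan of all header columns (keys x aliases x columns membership tests) with an inverted alias-to-key dict built once and a single left-to-right pass over the columns recording the first column index per canonical key.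
import Mathlib
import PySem

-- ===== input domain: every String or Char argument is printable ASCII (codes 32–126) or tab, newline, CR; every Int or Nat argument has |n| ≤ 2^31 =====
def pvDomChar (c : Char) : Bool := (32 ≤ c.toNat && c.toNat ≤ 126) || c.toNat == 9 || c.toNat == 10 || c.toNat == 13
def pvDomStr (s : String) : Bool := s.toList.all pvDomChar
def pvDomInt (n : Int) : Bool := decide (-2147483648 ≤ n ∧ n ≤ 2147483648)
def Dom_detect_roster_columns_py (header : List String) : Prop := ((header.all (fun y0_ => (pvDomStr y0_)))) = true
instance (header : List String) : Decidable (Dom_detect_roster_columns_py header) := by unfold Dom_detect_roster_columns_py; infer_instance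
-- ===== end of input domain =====

-- B replaces A's per-key rescans of the header with an inverted alias→key dict and one pass over the columns (idiomatic; same results).
-- A mutates nothing; equivalence is about the return value. On the ValueError path (excluded by Pre_) both ports return [].

-- the module constant _HEADER_ALIASES (shared data, used by both Pythons)
def pvHeaderAliases : List (String × List String) :=
  [("ano_mes", ["AÑO-MES", "ANO-MES", "AÑO_MES", "ANO_MES", "YEAR_MONTH", "MES"]),
   ("empresa", ["EMPRESA", "CIA", "COMPANY"]),
   ("empleado", ["EMPLEADO", "EMPLOYEE", "EMPLEADO_ID", "ID_EMPLEADO"]),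
   ("nombre", ["NOMBRE", "NAME", "NOMBRE_EMPLEADO"]),
   ("ceco_code", ["COD_CENTRO_DE_COSTO", "COD_CENTRO_COSTO", "CECO_CODE"])]

-- h.strip().upper().replace(" ", "_").replace("-", "_")  (identical line in both Pythons)
def pvNorm (h : String) : String :=
  PySem.Str.replace (PySem.Str.replace (PySem.Str.upper (PySem.Str.strip h)) " " "_") "-" "_"

-- ===== PORT A =====
-- A's inner loop: for i, col in enumerate(normalised): if col in [a.replace("-","_") for a in aliases]: break
def pvAScan (aliasNorms : List String) : List (Int × String) → Option Int
  | [] => none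
  | (i, col) :: rest => if aliasNorms.contains col then some i else pvAScan aliasNorms rest

-- A's outer loop over _HEADER_ALIASES.items()
def pvAResult (normalised : List String) : PySem.Dict String Int :=
  pvHeaderAliases.foldl (fun d p =>
    match pvAScan (p.2.map (fun a => PySem.Str.replace a "-" "_")) (PySem.List.enumerate normalised) with
    | some i => d.insert p.1 i
    | none => d) PySem.Dict.empty

def detect_roster_columns_py (header : List String) : List (String × Int) :=
  let normalised := header.map pvNorm
  let result := pvAResult normalised
  let missing := (pvHeaderAliases.map Prod.fst).filter (fun k => !(result.contains k))
  if missing = [] then result.items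
  else if 6 ≤ header.length then
    ((((result.setdefault "ano_mes" 0).setdefault "empresa" 1).setdefault "empleado" 2).setdefault
        "nombre" 3).setdefault "ceco_code" 5 |>.items
  else []  -- raise ValueError (excluded by Pre_)

-- ===== PORT B =====
-- _ALIAS_TO_KEY = {a.replace("-","_"): key for key, aliases in _HEADER_ALIASES.items() for a in aliases}
def pvAliasToKey : PySem.Dict String String :=
  pvHeaderAliases.foldl (fun d p =>
    p.2.foldl (fun d a => d.insert (PySem.Str.replace a "-" "_") p.1) d) PySem.Dict.empty

-- single pass over the columns: found.setdefault(key, i)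
def pvBFound (normalised : List String) : PySem.Dict String Int :=
  (PySem.List.enumerate normalised).foldl (fun d p =>
    match pvAliasToKey.get? p.2 with
    | some key => d.setdefault key p.1
    | none => d) PySem.Dict.empty

-- result = {k: found[k] for k in _HEADER_ALIASES if k in found}
def pvBResult (found : PySem.Dict String Int) : PySem.Dict String Int :=
  pvHeaderAliases.foldl (fun d p =>
    match found.get? p.1 with
    | some v => d.insert p.1 v
    | none => d) PySem.Dict.empty

def detect_roster_columns_py_alt (header : List String) : List (String × Int) :=
  let normalised := header.map pvNorm
  let result := pvBResult (pvBFound normalised)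
  let missing := (pvHeaderAliases.map Prod.fst).filter (fun k => !(result.contains k))
  if missing = [] then result.items
  else if 6 ≤ header.length then
    ((((result.setdefault "ano_mes" 0).setdefault "empresa" 1).setdefault "empleado" 2).setdefault
        "nombre" 3).setdefault "ceco_code" 5 |>.items
  else []  -- raise ValueError (excluded by Pre_)

-- ===== PRECONDITION & SPEC =====
-- A raises ValueError exactly when some canonical key matches no column AND len(header) < 6; Pre_ excludes those inputs.
def Pre_detect_roster_columns_py (header : List String) : Prop :=
  6 ≤ header.length ∨
    ∀ p ∈ pvHeaderAliases, ∃ h ∈ header,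
      (p.2.map (fun a => PySem.Str.replace a "-" "_")).contains (pvNorm h) = true
instance (header : List String) : Decidable (Pre_detect_roster_columns_py header) := by
  unfold Pre_detect_roster_columns_py; infer_instance

def pvWitness_detect_roster_columns_py : List String :=
  ["ano-mes", "empresa", "empleado", "nombre", "x", "ceco code"]

def Spec_detect_roster_columns_py (header : List String) (out : List (String × Int)) : Prop := out = detect_roster_columns_py_alt header
instance (header : List String) (out : List (String × Int)) : Decidable (Spec_detect_roster_columns_py header out) := by unfold Spec_detect_roster_columns_py; infer_instance

-- ===== CLAIM (what is proved, stated in full; the proofs are below) =====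
def Claim_equal_detect_roster_columns_py : Prop := ∀ (header : List String), Dom_detect_roster_columns_py header → Pre_detect_roster_columns_py header → Spec_detect_roster_columns_py header (detect_roster_columns_py header)

-- ===== LEMMAS AND PROOFS =====

-- membership in the inverted dict ↔ membership in that key's normalised alias list
theorem pvAliasToKey_get?_iff (key : String) (aliases : List String)
    (hmem : (key, aliases) ∈ pvHeaderAliases) (col : String) :
    ((aliases.map (fun a => PySem.Str.replace a "-" "_")).contains col = true ↔
      pvAliasToKey.get? col = some key) := by
  rw [PySem.Dict.get?_eq_some_iff_mem_items _ _ _ (by decide)]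
  rw [show pvAliasToKey.items = [("AÑO_MES", "ano_mes"), ("ANO_MES", "ano_mes"), ("YEAR_MONTH", "ano_mes"), ("MES", "ano_mes"), ("EMPRESA", "empresa"), ("CIA", "empresa"), ("COMPANY", "empresa"), ("EMPLEADO", "empleado"), ("EMPLOYEE", "empleado"), ("EMPLEADO_ID", "empleado"), ("ID_EMPLEADO", "empleado"), ("NOMBRE", "nombre"), ("NAME", "nombre"), ("NOMBRE_EMPLEADO", "nombre"), ("COD_CENTRO_DE_COSTO", "ceco_code"), ("COD_CENTRO_COSTO", "ceco_code"), ("CECO_CODE", "ceco_code")] from rfl]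
  fin_cases hmem <;>
    simp only [show List.map (fun a => PySem.Str.replace a "-" "_") ["AÑO-MES", "ANO-MES", "AÑO_MES", "ANO_MES", "YEAR_MONTH", "MES"] = ["AÑO_MES", "ANO_MES", "AÑO_MES", "ANO_MES", "YEAR_MONTH", "MES"] from rfl,
      show List.map (fun a => PySem.Str.replace a "-" "_") ["EMPRESA", "CIA", "COMPANY"] = ["EMPRESA", "CIA", "COMPANY"] from rfl,
      show List.map (fun a => PySem.Str.replace a "-" "_") ["EMPLEADO", "EMPLOYEE", "EMPLEADO_ID", "ID_EMPLEADO"] = ["EMPLEADO", "EMPLOYEE", "EMPLEADO_ID", "ID_EMPLEADO"] from rfl,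
      show List.map (fun a => PySem.Str.replace a "-" "_") ["NOMBRE", "NAME", "NOMBRE_EMPLEADO"] = ["NOMBRE", "NAME", "NOMBRE_EMPLEADO"] from rfl,
      show List.map (fun a => PySem.Str.replace a "-" "_") ["COD_CENTRO_DE_COSTO", "COD_CENTRO_COSTO", "CECO_CODE"] = ["COD_CENTRO_DE_COSTO", "COD_CENTRO_COSTO", "CECO_CODE"] from rfl] <;>
    simp [Prod.mk.injEq]; tauto

-- invariant of B's single pass: per key it records A's first-match index
theorem pvBFound_loop (key : String) (aliasNorms : List String)
    (hiff : ∀ col, aliasNorms.contains col = true ↔ pvAliasToKey.get? col = some key)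
    (l : List (Int × String)) (d : PySem.Dict String Int) :
    (l.foldl (fun d p => match pvAliasToKey.get? p.2 with
      | some k => d.setdefault k p.1
      | none => d) d).get? key
    = (d.get? key).or (pvAScan aliasNorms l) := by
  induction l generalizing d with
  | nil => simp [pvAScan]
  | cons p rest ih =>
    obtain ⟨i, col⟩ := p
    simp only [List.foldl_cons, pvAScan]
    by_cases hc : aliasNorms.contains col = true
    · have hk : pvAliasToKey.get? col = some key := (hiff col).mp hc
      rw [hk]
      simp only [ih, hc, if_true, PySem.Dict.get?_setdefault_self]
      cases d.get? key <;> simp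
    · have hnm : col ∉ aliasNorms := fun h => hc (List.contains_iff_mem.mpr h)
      rcases hck : pvAliasToKey.get? col with _ | k
      · simp only [ih]
        simp [hnm]
      · have hne : key ≠ k := by
          intro h; subst h; exact hc ((hiff col).mpr hck)
        simp only [ih, PySem.Dict.get?_setdefault_of_ne (hne := hne)]
        simp [hnm]

-- the two result dicts coincide
theorem pvResult_eq (normalised : List String) :
    pvAResult normalised = pvBResult (pvBFound normalised) := by
  have hk : ∀ key aliases, (key, aliases) ∈ pvHeaderAliases →
      (pvBFound normalised).get? key
        = pvAScan (aliases.map (fun a => PySem.Str.replace a "-" "_"))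
            (PySem.List.enumerate normalised) := by
    intro key aliases hmem
    rw [pvBFound, pvBFound_loop key _ (pvAliasToKey_get?_iff key aliases hmem)]
    simp
  simp only [pvAResult, pvBResult, pvHeaderAliases, List.foldl]
  rw [hk "ano_mes" ["AÑO-MES", "ANO-MES", "AÑO_MES", "ANO_MES", "YEAR_MONTH", "MES"] (by decide),
    hk "empresa" ["EMPRESA", "CIA", "COMPANY"] (by decide),
    hk "empleado" ["EMPLEADO", "EMPLOYEE", "EMPLEADO_ID", "ID_EMPLEADO"] (by decide),
    hk "nombre" ["NOMBRE", "NAME", "NOMBRE_EMPLEADO"] (by decide),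
    hk "ceco_code" ["COD_CENTRO_DE_COSTO", "COD_CENTRO_COSTO", "CECO_CODE"] (by decide)]


-- ===== VERDICT (by name: the statement is the Claim_ definition above) =====
theorem detect_roster_columns_py_spec : Claim_equal_detect_roster_columns_py := by
  intro header _ _
  show detect_roster_columns_py header = detect_roster_columns_py_alt header
  simp only [detect_roster_columns_py, detect_roster_columns_py_alt, pvResult_eq]
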